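-- pv_equiv track=rewrite | github.com/raghavddps2/Technical-Interview-Prep-1 | UD_DSA/Course0/Project1-Unscramble Computer Science Problems/task1.py | count_uniq_phone_numbers
-- ===== SOURCE A (Python) =====
-- def count_uniq_phone_numbers(texts_and_calls):
--     uniq_numbers = set()
--     for info in texts_and_calls:
--         n1 = info[0]
--         n2 = info[1]
--         uniq_numbers.add(n1)
--         uniq_numbers.add(n2)
--     return len(uniq_numbers)
-- ===== SOURCE B (Python) =====
-- def count_uniq_phone_numbers(texts_and_calls):
--     numbers = []
--     for info in texts_and_calls:
--         numbers += [info[0], info[1]]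
--     numbers = sorted(numbers)
--     count = 0
--     prev = None
--     for x in numbers:
--         if x != prev:
--             count += 1
--         prev = x
--     return count
-- ===== Notes on version B (the rewrite author's own statement) =====
-- stated objective: alternative
-- what changed: Replaces hash-set deduplication with a sort-then-adjacent-compare distinct count: gather all numbers into one list, sort it, and count elements that differ from their predecessor.
import Mathlib
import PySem

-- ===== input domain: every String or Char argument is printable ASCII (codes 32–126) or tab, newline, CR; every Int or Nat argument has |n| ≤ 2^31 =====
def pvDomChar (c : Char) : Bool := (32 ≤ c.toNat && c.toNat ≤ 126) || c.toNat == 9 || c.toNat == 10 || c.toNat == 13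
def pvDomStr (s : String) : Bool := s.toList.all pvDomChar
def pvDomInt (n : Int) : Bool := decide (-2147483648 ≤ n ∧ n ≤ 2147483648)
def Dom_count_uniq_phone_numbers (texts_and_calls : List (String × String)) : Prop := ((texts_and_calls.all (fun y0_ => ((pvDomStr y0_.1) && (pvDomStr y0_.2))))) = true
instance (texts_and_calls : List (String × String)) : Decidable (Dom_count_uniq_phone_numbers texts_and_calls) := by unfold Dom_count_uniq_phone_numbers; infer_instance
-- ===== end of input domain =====

-- B replaces A's hash-set deduplication by sort-then-adjacent-compare distinct counting (alternative algorithm, same results).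


-- ===== PORT A =====
-- A: add both numbers of every record to a set, return its size.
def count_uniq_phone_numbers (texts_and_calls : List (String × String)) : Int :=
  let uniq_numbers : PySem.Set String :=
    texts_and_calls.foldl
      (fun s info => PySem.Set.add (PySem.Set.add s info.1) info.2)
      PySem.Set.empty
  PySem.Set.len uniq_numbers

-- ===== PORT B =====
-- B: gather all numbers, sort, count elements differing from their predecessor.
def count_uniq_phone_numbers_alt (texts_and_calls : List (String × String)) : Int :=
  let numbers : List String :=
    texts_and_calls.foldl (fun acc info => acc ++ [info.1, info.2]) []
  let sortedNumbers := PySem.List.sorted numbers (fun x => x) false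
  (sortedNumbers.foldl
    (fun (st : Int × Option String) x =>
      (if some x ≠ st.2 then st.1 + 1 else st.1, some x))
    (0, none)).1

-- ===== PRECONDITION & SPEC =====
def Spec_count_uniq_phone_numbers (texts_and_calls : List (String × String)) (out : Int) : Prop := out = count_uniq_phone_numbers_alt texts_and_calls
instance (texts_and_calls : List (String × String)) (out : Int) : Decidable (Spec_count_uniq_phone_numbers texts_and_calls out) := by unfold Spec_count_uniq_phone_numbers; infer_instance

-- ===== CLAIM (what is proved, stated in full; the proofs are below) =====
def Claim_equal_count_uniq_phone_numbers : Prop := ∀ (texts_and_calls : List (String × String)), Dom_count_uniq_phone_numbers texts_and_calls → Spec_count_uniq_phone_numbers texts_and_calls (count_uniq_phone_numbers texts_and_calls)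

-- ===== LEMMAS AND PROOFS =====

-- recursive description of B's counting fold
def pvCountD (prev : Option String) : List String → Int
  | [] => 0
  | x :: xs => (if some x ≠ prev then 1 else 0) + pvCountD (some x) xs

theorem pvFoldl_countD (l : List String) (c : Int) (prev : Option String) :
    (l.foldl
      (fun (st : Int × Option String) x =>
        (if some x ≠ st.2 then st.1 + 1 else st.1, some x))
      (c, prev)).1 = c + pvCountD prev l := by
  induction l generalizing c prev with
  | nil => simp [pvCountD]
  | cons x xs ih =>
      simp only [List.foldl_cons, pvCountD, ih]
      split_ifs <;> ring

-- adjacent-distinct count of a sorted tail, relative to a predecessor ≤ every element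
theorem pvCountD_sorted (l : List String) (p : String)
    (hs : l.Pairwise (· ≤ ·)) (hp : ∀ y ∈ l, p ≤ y) :
    pvCountD (some p) l = ((l.toFinset.erase p).card : Int) := by
  induction l generalizing p with
  | nil => simp [pvCountD]
  | cons x xs ih =>
      rcases List.pairwise_cons.mp hs with ⟨hx, hxs⟩
      have hpx : p ≤ x := hp x (by simp)
      by_cases hxp : x = p
      · subst hxp
        have : pvCountD (some x) (x :: xs) = pvCountD (some x) xs := by
          simp [pvCountD]
        rw [this, ih x hxs hx]
        simp [Finset.erase_insert_eq_erase]
      · have hne : ¬ p = x := fun h => hxp h.symm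
        have hlt : p < x := lt_of_le_of_ne hpx hne
        have hpnx : p ∉ xs := fun h => absurd (hx p h) (not_le.mpr hlt)
        have hstep : pvCountD (some p) (x :: xs) = 1 + pvCountD (some x) xs := by
          simp [pvCountD, hxp]
        rw [hstep, ih x hxs hx]
        have hnp : p ∉ (insert x xs.toFinset : Finset String) := by
          simp [hpnx, hne]
        rw [List.toFinset_cons, Finset.erase_eq_of_notMem hnp]
        by_cases hmem : x ∈ xs.toFinset
        · rw [Finset.insert_eq_self.mpr hmem, Finset.card_erase_of_mem hmem]
          have : 1 ≤ xs.toFinset.card := Finset.card_pos.mpr ⟨x, hmem⟩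
          omega
        · rw [Finset.card_insert_of_notMem hmem, Finset.erase_eq_of_notMem hmem]
          push_cast
          ring

theorem pvCountD_none (l : List String) (hs : l.Pairwise (· ≤ ·)) :
    pvCountD none l = (l.toFinset.card : Int) := by
  cases l with
  | nil => simp [pvCountD]
  | cons x xs =>
      rcases List.pairwise_cons.mp hs with ⟨hx, hxs⟩
      have : pvCountD none (x :: xs) = 1 + pvCountD (some x) xs := by
        simp [pvCountD]
      rw [this, pvCountD_sorted xs x hxs hx, List.toFinset_cons]
      by_cases hmem : x ∈ xs.toFinset
      · rw [Finset.insert_eq_self.mpr hmem, Finset.card_erase_of_mem hmem]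
        have : 1 ≤ xs.toFinset.card := Finset.card_pos.mpr ⟨x, hmem⟩
        omega
      · rw [Finset.card_insert_of_notMem hmem, Finset.erase_eq_of_notMem hmem]
        push_cast
        ring

-- A's fold over pairs builds set(flatMap of the pairs)
theorem pvSetFold_eq (tc : List (String × String)) (s : PySem.Set String) :
    tc.foldl (fun s info => PySem.Set.add (PySem.Set.add s info.1) info.2) s
      = (tc.flatMap (fun info => [info.1, info.2])).foldl PySem.Set.add s := by
  induction tc generalizing s with
  | nil => rfl
  | cons p rest ih => simp [List.foldl_cons, ih]

theorem pvOfList_toFinset (l : List String) :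
    (PySem.Set.ofList l).toFinset = l.toFinset := by
  apply Finset.ext
  intro a
  simp [List.mem_toFinset, PySem.Set.mem_ofList]

theorem pvOfList_length (l : List String) :
    ((PySem.Set.ofList l).length : Int) = (l.toFinset.card : Int) := by
  rw [← pvOfList_toFinset, List.toFinset_card_of_nodup (PySem.Set.nodup_ofList l)]

-- ===== VERDICT (by name: the statement is the Claim_ definition above) =====
theorem count_uniq_phone_numbers_spec : Claim_equal_count_uniq_phone_numbers := by
  intro tc _
  have hflat : tc.foldl (fun acc info => acc ++ [info.1, info.2]) ([] : List String)
      = tc.flatMap (fun info => [info.1, info.2]) := by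
    rw [PySem.List.foldl_append_eq_flatMap]
    simp
  have hpair := PySem.List.sorted_pairwise (tc.flatMap (fun info => [info.1, info.2])) (fun x => x)
  have hperm := PySem.List.sorted_perm (tc.flatMap (fun info => [info.1, info.2])) (fun x => x) false
  have htf : (PySem.List.sorted (tc.flatMap (fun info => [info.1, info.2])) (fun x => x) false).toFinset
      = (tc.flatMap (fun info => [info.1, info.2])).toFinset := by
    apply Finset.ext
    intro a
    simp [List.mem_toFinset, hperm.mem_iff]
  have hA : count_uniq_phone_numbers tc
      = (((tc.flatMap (fun info => [info.1, info.2])).toFinset.card : Nat) : Int) := by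
    unfold count_uniq_phone_numbers
    rw [pvSetFold_eq]
    exact pvOfList_length (tc.flatMap (fun info => [info.1, info.2]))
  have hB : count_uniq_phone_numbers_alt tc
      = (((tc.flatMap (fun info => [info.1, info.2])).toFinset.card : Nat) : Int) := by
    unfold count_uniq_phone_numbers_alt
    simp only [hflat]
    rw [pvFoldl_countD, pvCountD_none _ hpair, htf]
    ring
  show count_uniq_phone_numbers tc = count_uniq_phone_numbers_alt tc
  rw [hA, hB]
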